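-- pv_equiv track=rewrite | github.com/ElevateDynasty/Ai-Form | backend/app/services/ocr_service.py | _guess_field_type
-- ===== SOURCE A (Python) =====
-- def _guess_field_type(label: str) -> str:
--     lower = label.lower()
--     if "email" in lower:
--         return "email"
--     if any(token in lower for token in ["phone", "mobile", "contact"]):
--         return "tel"
--     if any(token in lower for token in ["date", "dob", "birth"]):
--         return "date"
--     if any(token in lower for token in ["amount", "total", "number", "qty"]):
--         return "number"
--     if any(token in lower for token in ["address", "reason", "description", "notes"]):
--         return "textarea"
--     return "text"
-- ===== SOURCE B (Python) =====
-- # Single-pass text scan: slide over the label once, look up candidate tokens in a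
-- # hash map of token -> priority, collect matched priorities in a set, then pick
-- # the highest-priority (lowest number) matched field type.
-- TOKEN_MAP = {
--     "email": 0,
--     "phone": 1, "mobile": 1, "contact": 1,
--     "date": 2, "dob": 2, "birth": 2,
--     "amount": 3, "total": 3, "number": 3, "qty": 3,
--     "address": 4, "reason": 4, "description": 4, "notes": 4,
-- }
-- TYPES = ["email", "tel", "date", "number", "textarea"]
--
-- def _guess_field_type(label: str) -> str:
--     lower = label.lower()
--     found = set()
--     for i in range(len(lower)):
--         for tok, pri in TOKEN_MAP.items():
--             if lower.startswith(tok, i):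
--                 found.add(pri)
--     for pri, ftype in enumerate(TYPES):
--         if pri in found:
--             return ftype
--     return "text"
-- ===== Notes on version B (the rewrite author's own statement) =====
-- stated objective: alternative
-- what changed: Instead of testing each keyword group with substring searches in a fixed if-chain, B slides over the label once, matching tokens from a token->priority hash map at each position into a set of matched priorities, and then selects the best-priority field type.
import Mathlib
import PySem

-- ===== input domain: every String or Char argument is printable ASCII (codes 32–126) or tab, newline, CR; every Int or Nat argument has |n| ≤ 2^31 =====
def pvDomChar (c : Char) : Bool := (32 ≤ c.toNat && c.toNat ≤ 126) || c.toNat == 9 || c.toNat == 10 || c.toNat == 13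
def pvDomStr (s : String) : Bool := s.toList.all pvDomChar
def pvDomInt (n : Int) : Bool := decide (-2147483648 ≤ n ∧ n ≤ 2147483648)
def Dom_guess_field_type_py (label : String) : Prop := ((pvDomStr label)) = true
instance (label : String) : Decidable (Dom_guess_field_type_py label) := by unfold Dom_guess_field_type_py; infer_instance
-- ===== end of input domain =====

-- B replaces A's if-chain of per-group substring searches by one sliding scan of the label
-- against a token->priority map, collecting matched priorities in a set; same result (alternative).

-- ===== PORT A =====
def guess_field_type_py (label : String) : String :=
  let lower := PySem.Str.lower label
  if PySem.Str.isIn "email" lower then "email"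
  else if ["phone", "mobile", "contact"].any (fun token => PySem.Str.isIn token lower) then "tel"
  else if ["date", "dob", "birth"].any (fun token => PySem.Str.isIn token lower) then "date"
  else if ["amount", "total", "number", "qty"].any (fun token => PySem.Str.isIn token lower) then "number"
  else if ["address", "reason", "description", "notes"].any (fun token => PySem.Str.isIn token lower) then "textarea"
  else "text"

-- ===== PORT B =====
def pvTokenMap : List (List Char × Int) :=
  [("email".toList, 0),
   ("phone".toList, 1), ("mobile".toList, 1), ("contact".toList, 1),
   ("date".toList, 2), ("dob".toList, 2), ("birth".toList, 2),
   ("amount".toList, 3), ("total".toList, 3), ("number".toList, 3), ("qty".toList, 3),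
   ("address".toList, 4), ("reason".toList, 4), ("description".toList, 4), ("notes".toList, 4)]

def pvTypes : List String := ["email", "tel", "date", "number", "textarea"]

-- Source B's position loop: at each position i (= each suffix), try every token of the map
-- (lower.startswith(tok, i)) and add its priority to the set of matches
def pvScan : List Char → PySem.Set Int → PySem.Set Int
  | [], found => found
  | s@(_ :: rest), found =>
      pvScan rest (pvTokenMap.foldl
        (fun f tp => if PySem.Chars.startswith s tp.1 then f.add tp.2 else f) found)

-- Source B's selection loop over enumerate(TYPES): first priority present in the set wins
def pvSelect (found : PySem.Set Int) : Int → List String → String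
  | _, [] => "text"
  | pri, ftype :: rest => if found.contains pri then ftype else pvSelect found (pri + 1) rest

def guess_field_type_py_alt (label : String) : String :=
  pvSelect (pvScan (PySem.Str.lower label).toList PySem.Set.empty) 0 pvTypes

-- ===== PRECONDITION & SPEC =====
def Spec_guess_field_type_py (label : String) (out : String) : Prop := out = guess_field_type_py_alt label
instance (label : String) (out : String) : Decidable (Spec_guess_field_type_py label out) := by unfold Spec_guess_field_type_py; infer_instance

-- ===== CLAIM (what is proved, stated in full; the proofs are below) =====
def Claim_equal_guess_field_type_py : Prop := ∀ (label : String), Dom_guess_field_type_py label → Spec_guess_field_type_py label (guess_field_type_py label)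

-- ===== LEMMAS AND PROOFS =====

-- proof-side helper: tok occurs as a prefix of some suffix of s (what the scan detects for one token)
def pvOccurs (tok : List Char) : List Char → Bool
  | [] => false
  | s@(_ :: rest) => PySem.Chars.startswith s tok || pvOccurs tok rest

theorem pvOccurs_eq_isIn (tok : List Char) (h : tok ≠ []) :
    ∀ s, pvOccurs tok s = PySem.Chars.isIn tok s := by
  intro s
  induction s with
  | nil =>
      symm
      rw [pvOccurs, PySem.Chars.isIn_eq_false_iff]
      intro hinf
      exact h (List.eq_nil_of_infix_nil hinf)
  | cons c rest ih =>
      rw [pvOccurs, ih, Bool.eq_iff_iff]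
      simp only [Bool.or_eq_true, PySem.Chars.startswith_iff,
        ← PySem.Chars.exists_prefix_drop_iff_isIn]
      constructor
      · rintro (hp | ⟨j, hj⟩)
        · exact ⟨0, by simpa using hp⟩
        · exact ⟨j + 1, by simpa using hj⟩
      · rintro ⟨j, hj⟩
        cases j with
        | zero => exact Or.inl (by simpa using hj)
        | succ j => exact Or.inr ⟨j, by simpa using hj⟩

theorem mem_foldl_add (s : List Char) (k : Int) :
    ∀ (l : List (List Char × Int)) (f : PySem.Set Int),
    (k ∈ l.foldl (fun f tp => if PySem.Chars.startswith s tp.1 then f.add tp.2 else f) f)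
      ↔ k ∈ f ∨ ∃ tp ∈ l, PySem.Chars.startswith s tp.1 = true ∧ tp.2 = k := by
  intro l
  induction l with
  | nil => simp
  | cons t rest ih =>
      intro f
      rw [List.foldl_cons, ih]
      by_cases hs : PySem.Chars.startswith s t.1 = true
      · simp only [hs, if_pos, PySem.Set.mem_add, List.mem_cons]
        constructor
        · rintro ((hf | hk) | ⟨tp, h1, h2, h3⟩)
          · exact Or.inl hf
          · exact Or.inr ⟨t, Or.inl rfl, hs, hk.symm⟩
          · exact Or.inr ⟨tp, Or.inr h1, h2, h3⟩
        · rintro (hf | ⟨tp, rfl | h1, h2, h3⟩)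
          · exact Or.inl (Or.inl hf)
          · exact Or.inl (Or.inr h3.symm)
          · exact Or.inr ⟨tp, h1, h2, h3⟩
      · simp only [hs, Bool.false_eq_true, if_false, List.mem_cons]
        constructor
        · rintro (hf | ⟨tp, h1, h2, h3⟩)
          · exact Or.inl hf
          · exact Or.inr ⟨tp, Or.inr h1, h2, h3⟩
        · rintro (hf | ⟨tp, rfl | h1, h2, h3⟩)
          · exact Or.inl hf
          · exact absurd h2 hs
          · exact Or.inr ⟨tp, h1, h2, h3⟩

theorem mem_pvScan (k : Int) :
    ∀ (s : List Char) (f : PySem.Set Int),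
    k ∈ pvScan s f ↔ k ∈ f ∨ ∃ tp ∈ pvTokenMap, pvOccurs tp.1 s = true ∧ tp.2 = k := by
  intro s
  induction s with
  | nil => intro f; simp [pvScan, pvOccurs]
  | cons c rest ih =>
      intro f
      rw [pvScan, ih, mem_foldl_add]
      simp only [pvOccurs, Bool.or_eq_true]
      constructor
      · rintro ((hf | ⟨tp, htp, hsw, hk⟩) | ⟨tp, htp, hocc, hk⟩)
        · exact Or.inl hf
        · exact Or.inr ⟨tp, htp, Or.inl hsw, hk⟩
        · exact Or.inr ⟨tp, htp, Or.inr hocc, hk⟩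
      · rintro (hf | ⟨tp, htp, hsw | hocc, hk⟩)
        · exact Or.inl (Or.inl hf)
        · exact Or.inl (Or.inr ⟨tp, htp, hsw, hk⟩)
        · exact Or.inr ⟨tp, htp, hocc, hk⟩

theorem contains_pvScan_empty (L : List Char) (k : Int) :
    (pvScan L PySem.Set.empty).contains k
      = pvTokenMap.any (fun tp => tp.2 == k && pvOccurs tp.1 L) := by
  rw [Bool.eq_iff_iff, PySem.Set.contains_iff, mem_pvScan]
  simp only [List.any_eq_true, Bool.and_eq_true, beq_iff_eq]
  constructor
  · rintro (hf | ⟨tp, htp, hocc, hk⟩)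
    · exact absurd hf (by simp [PySem.Set.empty])
    · exact ⟨tp, htp, hk, hocc⟩
  · rintro ⟨tp, htp, hk, hocc⟩
    exact Or.inr ⟨tp, htp, hocc, hk⟩

-- ===== VERDICT (by name: the statement is the Claim_ definition above) =====
theorem guess_field_type_py_spec : Claim_equal_guess_field_type_py := by
  intro label _
  unfold Spec_guess_field_type_py guess_field_type_py guess_field_type_py_alt
  simp only [pvTypes, pvSelect, contains_pvScan_empty, pvTokenMap,
    List.any_cons, List.any_nil]
  rw [pvOccurs_eq_isIn _ (by decide), pvOccurs_eq_isIn _ (by decide),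
    pvOccurs_eq_isIn _ (by decide), pvOccurs_eq_isIn _ (by decide),
    pvOccurs_eq_isIn _ (by decide), pvOccurs_eq_isIn _ (by decide),
    pvOccurs_eq_isIn _ (by decide), pvOccurs_eq_isIn _ (by decide),
    pvOccurs_eq_isIn _ (by decide), pvOccurs_eq_isIn _ (by decide),
    pvOccurs_eq_isIn _ (by decide), pvOccurs_eq_isIn _ (by decide),
    pvOccurs_eq_isIn _ (by decide), pvOccurs_eq_isIn _ (by decide),
    pvOccurs_eq_isIn _ (by decide)]
  simp [PySem.Str.isIn_eq]
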